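-- pv_equiv track=rewrite | github.com/Khushi-333/GameDesign2021 | hangmanTry2.py | updateWord
-- ===== SOURCE A (Python) =====
-- def updateWord(word, guesses):  # function with a parameter to update word
--     displayWord = ""
--     for char in word:
--         if char in guesses:
--             displayWord += char+" "
--         else:
--             displayWord += "_"
--             return displayWord
-- ===== SOURCE B (Python) =====
-- def updateWord(word, guesses):
--     idx = next((i for i, c in enumerate(word) if c not in guesses), None)
--     if idx is None:
--         return "".join(c + " " for c in word)
--     return "".join(c + " " for c in word[:idx]) + "_"
-- ===== Notes on version B (the rewrite author's own statement) =====
-- stated objective: alternative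
-- what changed: B first locates the index of the first unguessed letter in one scan, then builds the display from a slice in a second pass, instead of A's single loop that appends and early-returns on the first miss.
-- outside the precondition, e.g. on updateWord('ab', ['a', 'b']): A returns None, B returns 'a b '
import Mathlib
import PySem

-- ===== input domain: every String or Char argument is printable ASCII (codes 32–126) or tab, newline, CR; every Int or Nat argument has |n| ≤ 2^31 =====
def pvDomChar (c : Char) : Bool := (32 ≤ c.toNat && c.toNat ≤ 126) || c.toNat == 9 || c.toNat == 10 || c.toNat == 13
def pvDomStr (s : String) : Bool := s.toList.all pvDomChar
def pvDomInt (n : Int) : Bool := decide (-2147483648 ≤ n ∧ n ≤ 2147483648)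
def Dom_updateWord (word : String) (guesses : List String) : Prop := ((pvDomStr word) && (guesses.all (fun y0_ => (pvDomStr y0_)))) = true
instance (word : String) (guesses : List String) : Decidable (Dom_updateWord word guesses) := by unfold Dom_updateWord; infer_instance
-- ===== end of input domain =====

-- B finds the first unguessed index in one scan, then renders a slice; equivalence is about the return value.

-- ===== PORT A =====
-- A's loop: append "c " while c is guessed, return acc ++ "_" at the first miss;
-- if the loop finishes (every char guessed) Python A returns None, excluded by Pre_.
def updateWordGo (guesses : List String) : List Char → String → String
  | [], acc => acc
  | c :: rest, acc =>
    if guesses.contains (String.mk [c]) then updateWordGo guesses rest (acc ++ String.mk [c] ++ " ")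
    else acc ++ "_"

def updateWord (word : String) (guesses : List String) : String :=
  updateWordGo guesses word.toList ""

-- ===== PORT B =====
def updateWordJoin (l : List Char) : String :=
  String.join (l.map (fun c => String.mk [c] ++ " "))

def updateWord_alt (word : String) (guesses : List String) : String :=
  match word.toList.findIdx? (fun c => !(guesses.contains (String.mk [c]))) with
  | none => updateWordJoin word.toList
  | some i => updateWordJoin (word.toList.take i) ++ "_"

-- ===== PRECONDITION & SPEC =====
-- Pre_ excludes inputs where every character of word is guessed (including the empty word):
-- there Python A falls off the loop and returns None, not a string; B returns the full display.
def Pre_updateWord (word : String) (guesses : List String) : Prop :=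
  (word.toList.any (fun c => !(guesses.contains (String.mk [c])))) = true
instance (word : String) (guesses : List String) : Decidable (Pre_updateWord word guesses) := by
  unfold Pre_updateWord; infer_instance

def pvWitness_updateWord : String × List String := ("hey", ["h", "y"])

def Spec_updateWord (word : String) (guesses : List String) (out : String) : Prop := out = updateWord_alt word guesses
instance (word : String) (guesses : List String) (out : String) : Decidable (Spec_updateWord word guesses out) := by unfold Spec_updateWord; infer_instance

-- ===== CLAIM (what is proved, stated in full; the proofs are below) =====
def Claim_equal_updateWord : Prop := ∀ (word : String) (guesses : List String), Dom_updateWord word guesses → Pre_updateWord word guesses → Spec_updateWord word guesses (updateWord word guesses)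

-- ===== LEMMAS AND PROOFS =====

theorem pvFoldlAppendInit (l : List String) (a b : String) :
    l.foldl (fun r s => r ++ s) (a ++ b) = a ++ l.foldl (fun r s => r ++ s) b := by
  induction l generalizing b with
  | nil => simp
  | cons x xs ih => simp [List.foldl_cons, String.append_assoc, ih]

theorem updateWordGo_eq (guesses : List String) (l : List Char) (i : Nat)
    (h : l.findIdx? (fun c => !(guesses.contains (String.mk [c]))) = some i) :
    ∀ acc : String, updateWordGo guesses l acc = acc ++ updateWordJoin (l.take i) ++ "_" := by
  induction l generalizing i with
  | nil => simp [List.findIdx?, List.findIdx?.go] at h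
  | cons c rest ih =>
    intro acc
    by_cases hc : guesses.contains (String.mk [c])
    · simp only [List.findIdx?_cons, hc, Bool.not_true, Bool.false_eq_true, if_false,
        Option.map_eq_some_iff] at h
      obtain ⟨j, hj, hji⟩ := h
      subst hji
      simp only [updateWordGo, if_pos hc, List.take_succ_cons, updateWordJoin, List.map_cons,
        String.join]
      rw [ih j hj]
      have := pvFoldlAppendInit ((List.take j rest).map (fun c => String.mk [c] ++ " "))
        (String.mk [c] ++ " ") ""
      simp only [String.append_empty] at this
      simp only [updateWordJoin, String.join, List.map_take] at *
      rw [List.foldl_cons, String.empty_append, this]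
      simp [String.append_assoc]
    · have hc' : guesses.contains (String.mk [c]) = false := eq_false_of_ne_true hc
      simp only [List.findIdx?_cons, hc', Bool.not_false, if_true, Option.some.injEq] at h
      subst h
      have hm : String.mk [c] ∉ guesses := by simpa using hc
      simp [updateWordGo, hm, updateWordJoin, String.join]

-- ===== VERDICT (by name: the statement is the Claim_ definition above) =====
theorem updateWord_spec : Claim_equal_updateWord := by
  intro word guesses _ hpre
  unfold Spec_updateWord updateWord updateWord_alt
  unfold Pre_updateWord at hpre
  cases hidx : word.toList.findIdx? (fun c => !(guesses.contains (String.mk [c]))) with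
  | none =>
    exfalso
    rw [List.findIdx?_eq_none_iff] at hidx
    rw [List.any_eq_true] at hpre
    obtain ⟨c, hc, hmiss⟩ := hpre
    have := hidx c hc
    simp_all
  | some i =>
    rw [updateWordGo_eq guesses word.toList i hidx ""]
    simp
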